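-- pv_equiv track=rewrite | github.com/uca-mdlab/sanefalcon | predictor.py | getBinnedProfiles
-- ===== SOURCE A (Python) =====
-- def getBinnedProfiles(trainingSet,binSize=25):
--     binnedSamples = []
--     for sample in trainingSet:
--         binValues = []
--         for i in range(int(len(sample)/binSize)):
--             binValues.append(sum(sample[i * binSize: i * binSize+binSize]))
--         binnedSamples.append(binValues)
--     return binnedSamples
-- ===== SOURCE B (Python) =====
-- def getBinnedProfiles(trainingSet, binSize=25):
--     binnedSamples = []
--     for sample in trainingSet:
--         binValues = []
--         acc = 0
--         c = 0
--         for x in sample: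
--             acc += x
--             c += 1
--             if c == binSize:
--                 binValues.append(acc)
--                 acc = 0
--                 c = 0
--         binnedSamples.append(binValues)
--     return binnedSamples
-- ===== Notes on version B (the rewrite author's own statement) =====
-- stated objective: alternative
-- what changed: The per-bin slice-and-sum indexed by range(len//binSize) is replaced by a single streaming pass over each sample with a running accumulator and element counter, emitting a bin whenever the counter reaches binSize and discarding the trailing partial bin.
import Mathlib
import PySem

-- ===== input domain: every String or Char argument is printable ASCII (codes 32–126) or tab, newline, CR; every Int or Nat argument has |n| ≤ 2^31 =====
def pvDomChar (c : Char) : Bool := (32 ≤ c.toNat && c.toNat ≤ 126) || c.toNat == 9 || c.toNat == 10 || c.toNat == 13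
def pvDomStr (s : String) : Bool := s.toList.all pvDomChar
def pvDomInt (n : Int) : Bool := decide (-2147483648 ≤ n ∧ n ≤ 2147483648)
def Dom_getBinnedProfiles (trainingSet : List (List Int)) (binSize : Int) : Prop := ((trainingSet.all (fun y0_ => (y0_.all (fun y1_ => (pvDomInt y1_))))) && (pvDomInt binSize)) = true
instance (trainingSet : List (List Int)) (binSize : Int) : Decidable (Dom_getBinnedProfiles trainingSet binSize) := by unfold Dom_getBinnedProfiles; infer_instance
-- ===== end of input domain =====

-- B replaces A's per-bin slice-and-sum with a single streaming accumulator pass per sample (same cost, different decomposition).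


-- ===== PORT A =====
def getBinnedProfiles (trainingSet : List (List Int)) (binSize : Int) : List (List Int) :=
  trainingSet.foldl
    (fun binnedSamples sample =>
      binnedSamples ++
        [(PySem.List.pyRange 0 (PySem.Int.truncdiv (sample.length : Int) binSize) 1).foldl
          (fun binValues i =>
            binValues ++ [(PySem.List.slice sample (some (i * binSize)) (some (i * binSize + binSize))).sum])
          []])
    []

-- ===== PORT B =====
-- inner streaming loop of Source B: running sum acc, counter c, emit a bin when c reaches binSize
def pvAltLoop (binSize : Int) (sample : List Int) (binValues : List Int) (acc c : Int) : List Int :=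
  match sample with
  | [] => binValues
  | x :: rest =>
    if c + 1 == binSize then pvAltLoop binSize rest (binValues ++ [acc + x]) 0 0
    else pvAltLoop binSize rest binValues (acc + x) (c + 1)

def getBinnedProfiles_alt (trainingSet : List (List Int)) (binSize : Int) : List (List Int) :=
  trainingSet.foldl (fun binnedSamples sample => binnedSamples ++ [pvAltLoop binSize sample [] 0 0]) []

-- ===== PRECONDITION & SPEC =====
-- Pre_ excludes exactly the inputs where A raises ZeroDivisionError: binSize = 0 with a non-empty trainingSet.
def Pre_getBinnedProfiles (trainingSet : List (List Int)) (binSize : Int) : Prop :=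
  binSize ≠ 0 ∨ trainingSet = []
instance (trainingSet : List (List Int)) (binSize : Int) : Decidable (Pre_getBinnedProfiles trainingSet binSize) := by unfold Pre_getBinnedProfiles; infer_instance

def pvWitness_getBinnedProfiles : List (List Int) × Int := ([[1, 2, 3, 4, 5], [6, 7]], 2)

def Spec_getBinnedProfiles (trainingSet : List (List Int)) (binSize : Int) (out : List (List Int)) : Prop := out = getBinnedProfiles_alt trainingSet binSize
instance (trainingSet : List (List Int)) (binSize : Int) (out : List (List Int)) : Decidable (Spec_getBinnedProfiles trainingSet binSize out) := by unfold Spec_getBinnedProfiles; infer_instance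

-- ===== CLAIM (what is proved, stated in full; the proofs are below) =====
def Claim_equal_getBinnedProfiles : Prop := ∀ (trainingSet : List (List Int)) (binSize : Int), Dom_getBinnedProfiles trainingSet binSize → Pre_getBinnedProfiles trainingSet binSize → Spec_getBinnedProfiles trainingSet binSize (getBinnedProfiles trainingSet binSize)

-- ===== LEMMAS AND PROOFS =====

-- reference chunking function both per-sample computations are reduced to
def chunkSums (b : Nat) (s : List Int) : List Int :=
  if 0 < b ∧ b ≤ s.length then (s.take b).sum :: chunkSums b (s.drop b) else []
termination_by s.length
decreasing_by simp; omega

theorem pvAltLoop_nonpos (b : Int) (hb : b ≤ 0) (s : List Int) (bins : List Int) (acc c : Int)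
    (hc : 0 ≤ c) : pvAltLoop b s bins acc c = bins := by
  induction s generalizing acc c with
  | nil => rfl
  | cons x rest ih =>
    rw [pvAltLoop, if_neg (by simp; omega)]
    exact ih _ _ (by omega)

theorem pvAltLoop_append (b : Int) (s : List Int) (bins : List Int) (acc c : Int) :
    pvAltLoop b s bins acc c = bins ++ pvAltLoop b s [] acc c := by
  induction s generalizing bins acc c with
  | nil => simp [pvAltLoop]
  | cons x rest ih =>
    rw [pvAltLoop, pvAltLoop]
    split
    · rw [ih (bins ++ [acc + x]), ih ([] ++ [acc + x])]; simp
    · exact ih bins _ _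

theorem chunk_unfold (b : Int) (hb : 0 < b) (s : List Int) :
    (if (b - 0).toNat ≤ s.length then
        ((0 : Int) + (s.take (b - 0).toNat).sum) :: chunkSums b.toNat (s.drop (b - 0).toNat)
      else []) = chunkSums b.toNat s := by
  conv_rhs => rw [chunkSums]
  have hb0 : (b - 0).toNat = b.toNat := by omega
  rw [hb0]
  split
  · rename_i h; rw [if_pos ⟨by omega, h⟩, zero_add]
  · rename_i h; rw [if_neg (by omega)]

theorem pvAltLoop_chunk (b : Int) (hb : 0 < b) (s : List Int) (acc c : Int)
    (hc : 0 ≤ c) (hcb : c < b) :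
    pvAltLoop b s [] acc c =
      if (b - c).toNat ≤ s.length then
        (acc + (s.take (b - c).toNat).sum) :: chunkSums b.toNat (s.drop (b - c).toNat)
      else [] := by
  induction s generalizing acc c with
  | nil =>
    rw [pvAltLoop, if_neg (by simp; omega)]
  | cons x rest ih =>
    rw [pvAltLoop]
    split
    · rename_i h
      have hb1 : (b - c).toNat = 1 := by simp at h; omega
      rw [pvAltLoop_append, ih 0 0 le_rfl hb, chunk_unfold b hb rest, hb1]
      rw [if_pos (by simp)]
      simp
    · rename_i h
      have hk : (b - c).toNat = (b - (c + 1)).toNat + 1 := by simp at h; omega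
      rw [ih (acc + x) (c + 1) (by omega) (by simp at h; omega)]
      rw [hk]
      simp only [List.take_succ_cons, List.sum_cons, List.drop_succ_cons, List.length_cons]
      split
      · rename_i h2
        rw [if_pos (by omega), add_assoc]
      · rename_i h2
        rw [if_neg (by omega)]

theorem pvAltLoop_eq_chunkSums (b : Int) (hb : 0 < b) (s : List Int) :
    pvAltLoop b s [] 0 0 = chunkSums b.toNat s := by
  rw [pvAltLoop_chunk b hb s 0 0 le_rfl hb]
  exact chunk_unfold b hb s

theorem range_map_eq_chunkSums_aux (bn : Nat) (hb : 0 < bn) : ∀ (n : Nat) (s : List Int), s.length ≤ n →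
    (List.range (s.length / bn)).map (fun k => ((s.drop (k * bn)).take bn).sum) = chunkSums bn s := by
  intro n
  induction n with
  | zero =>
    intro s hs
    rw [chunkSums, if_neg (by omega)]
    have h0 : s.length / bn = 0 := Nat.div_eq_of_lt (by omega)
    simp [h0]
  | succ n ih =>
    intro s hs
    by_cases h : bn ≤ s.length
    · rw [chunkSums, if_pos ⟨hb, h⟩]
      have hdiv : s.length / bn = (s.length - bn) / bn + 1 := Nat.div_eq_sub_div hb h
      rw [hdiv, List.range_succ_eq_map, List.map_cons, List.map_map]
      congr 1
      · simp
      · have hlen : (s.drop bn).length = s.length - bn := by simp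
        have hle : s.length - bn ≤ n := by omega
        rw [← ih (s.drop bn) (by rw [hlen]; exact hle), hlen]
        apply List.map_congr_left
        intro k _
        simp only [Function.comp_apply, List.drop_drop]
        congr 2
        congr 1
        simp only [Nat.succ_eq_add_one]
        ring
    · rw [chunkSums, if_neg (by omega)]
      have h0 : s.length / bn = 0 := Nat.div_eq_of_lt (by omega)
      simp [h0]

theorem range_map_eq_chunkSums (bn : Nat) (hb : 0 < bn) (s : List Int) :
    (List.range (s.length / bn)).map (fun k => ((s.drop (k * bn)).take bn).sum) = chunkSums bn s :=
  range_map_eq_chunkSums_aux bn hb s.length s le_rfl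

theorem truncdiv_pos (a : Nat) (b : Int) (h : 0 < b) :
    PySem.Int.truncdiv (a : Int) b = ((a / b.toNat : Nat) : Int) := by
  obtain ⟨bn, rfl⟩ : ∃ bn : Nat, b = ↑bn := ⟨b.toNat, (Int.toNat_of_nonneg h.le).symm⟩
  unfold PySem.Int.truncdiv
  rw [Int.tdiv_eq_ediv]
  simp

theorem truncdiv_neg (a : Nat) (b : Int) (h : b < 0) : PySem.Int.truncdiv (a : Int) b ≤ 0 := by
  unfold PySem.Int.truncdiv
  rw [Int.tdiv_eq_ediv]
  have := Int.ediv_nonpos_of_nonneg_of_nonpos (a := (a : Int)) (b := b) (by positivity) (by omega)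
  rcases Int.le_iff_lt_or_eq.mp this with h1 | h1
  · split <;> omega
  · rw [h1]; split
    · omega
    · have : b.sign = -1 := Int.sign_eq_neg_one_of_neg h; omega

-- the two per-sample computations agree for every binSize ≠ 0
theorem inner_eq (sample : List Int) (b : Int) (hb : b ≠ 0) :
    (PySem.List.pyRange 0 (PySem.Int.truncdiv (sample.length : Int) b) 1).foldl
      (fun binValues i =>
        binValues ++ [(PySem.List.slice sample (some (i * b)) (some (i * b + b))).sum]) [] =
    pvAltLoop b sample [] 0 0 := by
  rcases lt_or_gt_of_ne hb with hneg | hpos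
  · rw [PySem.List.pyRange_one_eq_nil (by have := truncdiv_neg sample.length b hneg; omega)]
    rw [pvAltLoop_nonpos b (by omega) sample [] 0 0 le_rfl]
    rfl
  · rw [PySem.List.foldl_append_singleton_eq_map]
    rw [truncdiv_pos sample.length b hpos]
    rw [PySem.List.pyRange_zero_natCast]
    rw [List.map_map]
    rw [pvAltLoop_eq_chunkSums b hpos]
    rw [← range_map_eq_chunkSums b.toNat (by omega) sample]
    apply List.map_congr_left
    intro k _
    have hcast : (k : Int) * b = ((k * b.toNat : Nat) : Int) := by
      push_cast
      rw [Int.toNat_of_nonneg hpos.le]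
    simp only [Function.comp_apply, hcast]
    have : ((k * b.toNat : Nat) : Int) + b = ((k * b.toNat : Nat) : Int) + ((b.toNat : Nat) : Int) := by
      rw [Int.toNat_of_nonneg hpos.le]
    rw [this, PySem.List.slice_natCast_add]

-- ===== VERDICT (by name: the statement is the Claim_ definition above) =====
theorem getBinnedProfiles_spec : Claim_equal_getBinnedProfiles := by
  intro trainingSet binSize _ hpre
  unfold Spec_getBinnedProfiles getBinnedProfiles getBinnedProfiles_alt
  rcases hpre with hb | rfl
  · rw [PySem.List.foldl_append_singleton_eq_map, PySem.List.foldl_append_singleton_eq_map]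
    exact List.map_congr_left (fun sample _ => inner_eq sample binSize hb)
  · rfl
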